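-- pv_equiv track=rewrite | github.com/rjury-sumo/sumologic-poweruser-mcp | src/sumologic_mcp_server/query_patterns.py | extract_scope_from_query
-- ===== SOURCE A (Python) =====
-- def extract_scope_from_query(query: str) -> str:
--     """Extract the scope portion from a full query (before first |).
--
--     Args:
--         query: Full Sumo Logic query
--
--     Returns:
--         Scope portion (everything before first pipe)
--
--     Example:
--         >>> ScopePattern.extract_scope_from_query('error | count by _sourceHost')
--         'error'
--     """
--     # Find first pipe not inside quotes
--     in_quotes = False
--     quote_char = None
--
--     for i, char in enumerate(query):
--         if char in ['"', "'"]: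
--             if not in_quotes:
--                 in_quotes = True
--                 quote_char = char
--             elif char == quote_char:
--                 in_quotes = False
--         elif char == '|' and not in_quotes:
--             return query[:i].strip()
--
--     # No pipe found, entire query is scope
--     return query.strip()
-- ===== SOURCE B (Python) =====
-- def extract_scope_from_query(query: str) -> str:
--     """Token-wise variant: split on '|' and find the first balanced boundary."""
--     segments = query.split('|')
--     in_quotes = False
--     quote_char = None
--     for i in range(len(segments) - 1):
--         for ch in segments[i]:
--             if ch in ('"', "'"):
--                 if not in_quotes:
--                     in_quotes = True
--                     quote_char = ch
--                 elif ch == quote_char: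
--                     in_quotes = False
--         if not in_quotes:
--             return '|'.join(segments[:i + 1]).strip()
--     return query.strip()
-- ===== Notes on version B (the rewrite author's own statement) =====
-- stated objective: alternative
-- what changed: B first splits the query into pipe-delimited segments and walks the segment list, carrying the quote state across segments and returning the join of the leading segments at the first balanced boundary, instead of A's flat indexed character scan with an in-loop slice return.
import Mathlib
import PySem

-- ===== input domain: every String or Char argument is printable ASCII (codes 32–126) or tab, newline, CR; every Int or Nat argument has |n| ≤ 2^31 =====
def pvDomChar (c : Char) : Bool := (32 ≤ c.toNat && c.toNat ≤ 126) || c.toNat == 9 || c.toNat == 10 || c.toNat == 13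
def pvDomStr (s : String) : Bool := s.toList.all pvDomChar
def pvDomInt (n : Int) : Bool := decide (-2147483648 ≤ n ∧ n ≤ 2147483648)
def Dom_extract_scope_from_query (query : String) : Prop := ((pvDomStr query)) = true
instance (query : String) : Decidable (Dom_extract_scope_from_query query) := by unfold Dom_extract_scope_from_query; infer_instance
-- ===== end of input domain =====

-- B re-decomposes A's flat character scan into a pass over the pipe-split segments
-- (constant-factor faster in CPython: split/join do the bulk of the walk); values proved equal on all inputs.

-- ===== PORT A =====
-- A's for-loop over (i, char) with quote state; returns the index of the first
-- unquoted '|' (relative index = enumerate's i), none if the loop falls through.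
def pvLoopA : List Char → Bool → Option Char → Option Nat
  | [], _, _ => none
  | c :: cs, in_quotes, quote_char =>
    if c = '"' ∨ c = '\'' then
      if in_quotes = false then (pvLoopA cs true (some c)).map (· + 1)
      else if some c = quote_char then (pvLoopA cs false quote_char).map (· + 1)
      else (pvLoopA cs in_quotes quote_char).map (· + 1)
    else if c = '|' ∧ in_quotes = false then some 0
    else (pvLoopA cs in_quotes quote_char).map (· + 1)

def extract_scope_from_query (query : String) : String :=
  match pvLoopA query.toList false none with
  | some i => PySem.Str.strip (String.ofList (query.toList.take i))  -- query[:i].strip(); i is a nonneg in-range index so the slice is `take`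
  | none => PySem.Str.strip query                                -- query.strip()

-- ===== PORT B =====
-- Source B's inner `for ch in segments[i]` loop: fold the quote state over one segment.
def pvFoldSeg : List Char → Bool → Option Char → Bool × Option Char
  | [], in_quotes, quote_char => (in_quotes, quote_char)
  | c :: cs, in_quotes, quote_char =>
    if c = '"' ∨ c = '\'' then
      if in_quotes = false then pvFoldSeg cs true (some c)
      else if some c = quote_char then pvFoldSeg cs false quote_char
      else pvFoldSeg cs in_quotes quote_char
    else pvFoldSeg cs in_quotes quote_char

-- Source B's `for i in range(len(segments) - 1)` loop: returns the i of the first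
-- balanced boundary, none if it falls through (the last segment is not scanned).
def pvLoopB : List (List Char) → Bool → Option Char → Option Nat
  | [], _, _ => none
  | [_], _, _ => none
  | s :: rest, in_quotes, quote_char =>
    let st := pvFoldSeg s in_quotes quote_char
    if st.1 = false then some 0 else (pvLoopB rest st.1 st.2).map (· + 1)

def extract_scope_from_query_alt (query : String) : String :=
  let segments := PySem.Chars.splitOn query.toList ['|']       -- query.split('|')
  match pvLoopB segments false none with
  | some i => PySem.Str.strip (String.ofList (PySem.Chars.join ['|'] (segments.take (i + 1))))  -- '|'.join(segments[:i+1]).strip()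
  | none => PySem.Str.strip query                              -- query.strip()

-- ===== PRECONDITION & SPEC =====
def Spec_extract_scope_from_query (query : String) (out : String) : Prop := out = extract_scope_from_query_alt query
instance (query : String) (out : String) : Decidable (Spec_extract_scope_from_query query out) := by unfold Spec_extract_scope_from_query; infer_instance

-- ===== CLAIM (what is proved, stated in full; the proofs are below) =====
def Claim_equal_extract_scope_from_query : Prop := ∀ (query : String), Dom_extract_scope_from_query query → Spec_extract_scope_from_query query (extract_scope_from_query query)

-- ===== LEMMAS AND PROOFS =====

-- structural characterisation of query.split('|') (single-char separator)
def pvSplit : List Char → List (List Char)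
  | [] => [[]]
  | c :: cs => if c = '|' then [] :: pvSplit cs else (pvSplit cs).modifyHead (c :: ·)

-- the quote-state update both programs perform on one character
def pvStep (c : Char) (st : Bool × Option Char) : Bool × Option Char :=
  if c = '"' ∨ c = '\'' then
    if st.1 = false then (true, some c)
    else if some c = st.2 then (false, st.2)
    else st
  else st

theorem pvSplit_ne_nil (cs : List Char) : pvSplit cs ≠ [] := by
  cases cs with
  | nil => simp [pvSplit]
  | cons c cs =>
    simp only [pvSplit]
    split
    · simp
    · cases h : pvSplit cs with
      | nil => exact absurd h (pvSplit_ne_nil cs)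
      | cons a t => simp

theorem pvGo_eq (l : List Char) : ∀ (fuel : Nat) (cur : List Char) (acc : List (List Char)),
    l.length ≤ fuel →
    PySem.Chars.splitOn.go ['|'] fuel l cur acc
      = acc.reverse ++ (pvSplit l).modifyHead (cur.reverse ++ ·) := by
  induction l with
  | nil =>
    intro fuel cur acc _
    cases fuel <;> simp [PySem.Chars.splitOn.go, pvSplit]
  | cons c rest ih =>
    intro fuel cur acc hlen
    cases fuel with
    | zero => simp at hlen
    | succ f =>
      simp only [PySem.Chars.splitOn.go]
      by_cases hc : c = '|'
      · have hpre : List.isPrefixOf ['|'] (c :: rest) = true := by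
          simp [List.isPrefixOf, hc]
        rw [if_pos hpre]
        have hr : rest.length ≤ f := by simp at hlen; omega
        have := ih f [] (cur.reverse :: acc) hr
        simp only [List.length_cons, List.length_nil, List.drop_succ_cons, List.drop_zero]
        rw [this]
        cases h : pvSplit rest with
        | nil => exact absurd h (pvSplit_ne_nil rest)
        | cons a t => simp [pvSplit, hc, h]
      · have hpre : List.isPrefixOf ['|'] (c :: rest) = false := by
          simp [List.isPrefixOf]; intro h; exact absurd h.symm hc
        rw [if_neg (by simp [hpre])]
        have hr : rest.length ≤ f := by simp at hlen; omega
        have := ih f (c :: cur) acc hr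
        rw [this]
        cases h : pvSplit rest with
        | nil => exact absurd h (pvSplit_ne_nil rest)
        | cons a t => simp [pvSplit, hc, h]

theorem pvSplitOn_eq (cs : List Char) : PySem.Chars.splitOn cs ['|'] = pvSplit cs := by
  unfold PySem.Chars.splitOn
  rw [pvGo_eq cs (cs.length + 1) [] [] (by omega)]
  cases h : pvSplit cs with
  | nil => exact absurd h (pvSplit_ne_nil cs)
  | cons a t => simp

theorem pvFoldSeg_cons (c : Char) (s : List Char) (inq : Bool) (qc : Option Char) :
    pvFoldSeg (c :: s) inq qc = pvFoldSeg s (pvStep c (inq, qc)).1 (pvStep c (inq, qc)).2 := by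
  simp only [pvFoldSeg, pvStep]
  split_ifs <;> rfl

theorem pvLoopA_cons (c : Char) (cs : List Char) (inq : Bool) (qc : Option Char)
    (h : ¬ (c = '|' ∧ inq = false)) :
    pvLoopA (c :: cs) inq qc
      = (pvLoopA cs (pvStep c (inq, qc)).1 (pvStep c (inq, qc)).2).map (· + 1) := by
  simp only [pvLoopA, pvStep]
  split_ifs with h1 h2 h3 <;> simp_all

theorem pvLoopB_modifyHead (c : Char) (segs : List (List Char)) (hne : segs ≠ [])
    (inq : Bool) (qc : Option Char) :
    pvLoopB (segs.modifyHead (c :: ·)) inq qc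
      = pvLoopB segs (pvStep c (inq, qc)).1 (pvStep c (inq, qc)).2 := by
  match segs with
  | [] => exact absurd rfl hne
  | [s] => rfl
  | s :: s' :: rest =>
    simp only [List.modifyHead, pvLoopB]
    rw [pvFoldSeg_cons]

-- the relation MAIN maintains between A's index and B's segment count
def pvRel : Option Nat → Option Nat → List Char → Prop
  | some i, some k, cs => cs.take i = PySem.Chars.join ['|'] ((pvSplit cs).take (k + 1))
  | none, none, _ => True
  | _, _, _ => False

theorem pvJoin_cons_head (c : Char) (h : List Char) (parts : List (List Char)) :
    PySem.Chars.join ['|'] ((c :: h) :: parts) = c :: PySem.Chars.join ['|'] (h :: parts) := by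
  cases parts with
  | nil => simp [PySem.Chars.join_singleton]
  | cons p ps => simp [PySem.Chars.join_cons_cons]

theorem pvMain (cs : List Char) : ∀ (inq : Bool) (qc : Option Char),
    pvRel (pvLoopA cs inq qc) (pvLoopB (pvSplit cs) inq qc) cs := by
  induction cs with
  | nil => intro inq qc; simp [pvLoopA, pvSplit, pvLoopB, pvRel]
  | cons c cs ih =>
    intro inq qc
    by_cases hc : c = '|'
    · subst hc
      have hsplit : pvSplit ('|' :: cs) = [] :: pvSplit cs := by simp [pvSplit]
      obtain ⟨h, t, hht⟩ : ∃ h t, pvSplit cs = h :: t := by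
        cases hsp : pvSplit cs with
        | nil => exact absurd hsp (pvSplit_ne_nil cs)
        | cons a b => exact ⟨a, b, rfl⟩
      rw [hsplit, hht]
      cases hq : inq with
      | false =>
        have hA : pvLoopA ('|' :: cs) false qc = some 0 := by
          simp [pvLoopA]
        have hB : pvLoopB ([] :: h :: t) false qc = some 0 := by
          simp [pvLoopB, pvFoldSeg]
        rw [hA, hB]
        simp only [pvRel]
        rw [hsplit, hht]
        simp [PySem.Chars.join_singleton]
      | true =>
        have hA : pvLoopA ('|' :: cs) true qc = (pvLoopA cs true qc).map (· + 1) := by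
          simp [pvLoopA]
        have hB : pvLoopB ([] :: h :: t) true qc = (pvLoopB (h :: t) true qc).map (· + 1) := by
          simp [pvLoopB, pvFoldSeg]
        rw [hA, hB]
        have := ih true qc
        rw [hht] at this
        cases hA' : pvLoopA cs true qc with
        | none =>
          cases hB' : pvLoopB (h :: t) true qc with
          | none => simp [pvRel]
          | some k => rw [hA', hB'] at this; simp [pvRel] at this
        | some i =>
          cases hB' : pvLoopB (h :: t) true qc with
          | none => rw [hA', hB'] at this; simp [pvRel] at this
          | some k =>
            rw [hA', hB'] at this
            simp only [Option.map_some, pvRel] at this ⊢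
            rw [hsplit, hht]
            simp only [List.take_succ_cons, PySem.Chars.join_cons_cons]
            simp only [hht, List.take_succ_cons] at this
            simp [this]
    · have hsplit : pvSplit (c :: cs) = (pvSplit cs).modifyHead (c :: ·) := by
        simp [pvSplit, hc]
      rw [hsplit, pvLoopB_modifyHead c _ (pvSplit_ne_nil cs),
          pvLoopA_cons c cs inq qc (by simp [hc])]
      have := ih (pvStep c (inq, qc)).1 (pvStep c (inq, qc)).2
      obtain ⟨h, t, hht⟩ : ∃ h t, pvSplit cs = h :: t := by
        cases hsp : pvSplit cs with
        | nil => exact absurd hsp (pvSplit_ne_nil cs)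
        | cons a b => exact ⟨a, b, rfl⟩
      rw [hht] at this ⊢
      cases hA' : pvLoopA cs (pvStep c (inq, qc)).1 (pvStep c (inq, qc)).2 with
      | none =>
        cases hB' : pvLoopB (h :: t) (pvStep c (inq, qc)).1 (pvStep c (inq, qc)).2 with
        | none => simp [pvRel]
        | some k => rw [hA', hB'] at this; simp [pvRel] at this
      | some i =>
        cases hB' : pvLoopB (h :: t) (pvStep c (inq, qc)).1 (pvStep c (inq, qc)).2 with
        | none => rw [hA', hB'] at this; simp [pvRel] at this
        | some k =>
          rw [hA', hB'] at this
          simp only [Option.map_some, pvRel] at this ⊢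
          rw [hsplit, hht]
          simp only [List.take_succ_cons, List.modifyHead]
          rw [pvJoin_cons_head]
          simp only [hht, List.take_succ_cons] at this
          simp [this]

-- ===== VERDICT (by name: the statement is the Claim_ definition above) =====
theorem extract_scope_from_query_spec : Claim_equal_extract_scope_from_query := by
  intro query _
  unfold Spec_extract_scope_from_query extract_scope_from_query extract_scope_from_query_alt
  rw [pvSplitOn_eq]
  have h := pvMain query.toList false none
  cases hA : pvLoopA query.toList false none with
  | none =>
    cases hB : pvLoopB (pvSplit query.toList) false none with
    | none => simp [hB]
    | some k => rw [hA, hB] at h; simp [pvRel] at h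
  | some i =>
    cases hB : pvLoopB (pvSplit query.toList) false none with
    | none => rw [hA, hB] at h; simp [pvRel] at h
    | some k =>
      rw [hA, hB] at h
      simp only [pvRel] at h
      simp [hB, h]
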